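-- pv_equiv track=rewrite | github.com/Zeydel/Advent-Of-Code | AoC24/Day05/Day05.py | correct_book
-- ===== SOURCE A (Python) =====
-- def build_prereq_list(rules, page):
--
--     # Init empty dict
--     prereqs = dict()
--
--     # For every pair of rules
--     for rule1, rule2 in rules:
--
--         # We only pair about rules where bouth numbers appear on the page
--         if rule1 not in page or rule2 not in page:
--             continue
--
--         # Add both rules to the dict
--         if rule1 not in prereqs:
--             prereqs[rule1] = []
--
--         if rule2 not in prereqs:
--             prereqs[rule2] = []
--
--         # Add the first number as a prerequiste for the second
--         prereqs[rule2].append(rule1)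
--
--     return prereqs
--
-- def correct_book(rules, page):
--
--     # Find the list of prereqs
--     prereqs = build_prereq_list(rules, page)
--
--     # Init var to store the fixed book
--     corrected = []
--
--     i = 0
--
--
--     # We first find the book with 0 prereqs, then the one with 1 and so on
--     # This assumes that there exists one unique solutions for each book
--     while i < len(page):
--
--         for rule in prereqs:
--
--             if len(prereqs[rule]) == i:
--                 corrected.append(rule)
--                 break
--
--         i += 1
--
--     return corrected
-- ===== SOURCE B (Python) =====
-- def correct_book(rules, page):
--     # One pass over rules: record each page's first-appearance order and its
--     # prerequisite COUNT (no per-page prerequisite lists are kept).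
--     order = []
--     counts = {}
--     for a, b in rules:
--         if a in page and b in page:
--             if a not in order:
--                 order.append(a)
--             if b not in order:
--                 order.append(b)
--             counts[b] = counts.get(b, 0) + 1
--     # Index once: count -> first page (in first-appearance order) with that count.
--     by_count = {}
--     for k in order:
--         c = counts.get(k, 0)
--         if c not in by_count:
--             by_count[c] = k
--     return [by_count[i] for i in range(len(page)) if i in by_count]
-- ===== Notes on version B (the rewrite author's own statement) =====
-- stated objective: alternative
-- what changed: B keeps no per-page prerequisite lists: one pass over rules records each page's first-appearance order and its prerequisite count, a count->first-page table is built once, and the output is a single comprehension over range(len(page)) - replacing A's dict-of-lists build plus a rescan of the whole dict per position.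
import Mathlib
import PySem

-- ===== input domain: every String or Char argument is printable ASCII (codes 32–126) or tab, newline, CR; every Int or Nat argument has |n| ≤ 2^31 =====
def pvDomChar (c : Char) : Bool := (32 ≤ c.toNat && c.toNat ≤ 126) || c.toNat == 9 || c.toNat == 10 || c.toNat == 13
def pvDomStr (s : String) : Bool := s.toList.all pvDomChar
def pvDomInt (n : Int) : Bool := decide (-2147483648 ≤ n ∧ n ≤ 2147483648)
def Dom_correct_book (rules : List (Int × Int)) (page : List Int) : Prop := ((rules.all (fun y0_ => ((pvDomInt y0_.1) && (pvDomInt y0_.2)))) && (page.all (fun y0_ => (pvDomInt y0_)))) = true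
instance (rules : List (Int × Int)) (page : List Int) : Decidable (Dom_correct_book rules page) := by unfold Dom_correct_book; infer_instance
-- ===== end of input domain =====

-- B keeps no per-page prerequisite lists: one pass over rules records first-appearance order and
-- prerequisite counts, a count->first-page table is built once, and one comprehension emits the
-- result — replacing A's dict-of-lists build plus a rescan of the whole dict per position.


-- ===== PORT A =====
-- helper of A: dict page -> list of its prerequisites, in key first-insertion order
def build_prereq_list (rules : List (Int × Int)) (page : List Int) : PySem.Dict Int (List Int) :=
  rules.foldl (fun prereqs r =>
    if ¬ page.contains r.1 ∨ ¬ page.contains r.2 then prereqs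
    else
      let prereqs := if prereqs.contains r.1 then prereqs else prereqs.insert r.1 []
      let prereqs := if prereqs.contains r.2 then prereqs else prereqs.insert r.2 []
      prereqs.modify r.2 [] (fun l => l ++ [r.1])) PySem.Dict.empty

-- 'for rule in prereqs: if len(prereqs[rule]) == i: append; break' = first match over items (keys unique)
def correct_book (rules : List (Int × Int)) (page : List Int) : List Int :=
  let prereqs := build_prereq_list rules page
  (PySem.List.pyRange 0 page.length 1).foldl (fun corrected i =>
    match prereqs.items.find? (fun kv => (kv.2.length : Int) == i) with
    | some kv => corrected ++ [kv.1]
    | none => corrected) []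

-- ===== PORT B =====
def correct_book_alt (rules : List (Int × Int)) (page : List Int) : List Int :=
  let st := rules.foldl (fun (st : List Int × PySem.Dict Int Int) ab =>
    if page.contains ab.1 && page.contains ab.2 then
      let order := if st.1.contains ab.1 then st.1 else st.1 ++ [ab.1]
      let order := if order.contains ab.2 then order else order ++ [ab.2]
      (order, st.2.insert ab.2 (st.2.getD ab.2 0 + 1))
    else st) ([], PySem.Dict.empty)
  let by_count := st.1.foldl (fun d k =>
    let c := st.2.getD k 0
    if d.contains c then d else d.insert c k) PySem.Dict.empty
  -- '[by_count[i] for i in range(len(page)) if i in by_count]': filterMap over get? is exact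
  (PySem.List.pyRange 0 page.length 1).filterMap (fun i => by_count.get? i)

-- ===== PRECONDITION & SPEC =====
def Spec_correct_book (rules : List (Int × Int)) (page : List Int) (out : List Int) : Prop := out = correct_book_alt rules page
instance (rules : List (Int × Int)) (page : List Int) (out : List Int) : Decidable (Spec_correct_book rules page out) := by unfold Spec_correct_book; infer_instance

-- ===== CLAIM (what is proved, stated in full; the proofs are below) =====
def Claim_equal_correct_book : Prop := ∀ (rules : List (Int × Int)) (page : List Int), Dom_correct_book rules page → Spec_correct_book rules page (correct_book rules page)

-- ===== LEMMAS AND PROOFS =====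

-- invariant tying A's dict of prerequisite LISTS to B's (first-appearance order, counts) pair
def pvInv (d : PySem.Dict Int (List Int)) (order : List Int) (counts : PySem.Dict Int Int) : Prop :=
  d.keys.Nodup ∧
  d.items.map (fun kv => (kv.1, (kv.2.length : Int))) = order.map (fun k => (k, counts.getD k 0)) ∧
  (∀ k, counts.contains k = true → order.contains k = true)

theorem pvInv_keys (d : PySem.Dict Int (List Int)) (order : List Int) (counts : PySem.Dict Int Int)
    (h : pvInv d order counts) : d.keys = order := by
  have h2 := congrArg (List.map Prod.fst) h.2.1
  simp only [List.map_map] at h2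
  have e1 : (Prod.fst ∘ fun kv : Int × List Int => (kv.1, (kv.2.length : Int))) = Prod.fst := rfl
  have e2 : (Prod.fst ∘ fun k : Int => (k, counts.getD k 0)) = id := rfl
  rw [e1, e2, List.map_id] at h2
  have hk : d.keys = d.items.map Prod.fst := rfl
  rw [hk, h2]

theorem pvInv_contains (d : PySem.Dict Int (List Int)) (order : List Int) (counts : PySem.Dict Int Int)
    (h : pvInv d order counts) (a : Int) : d.contains a = order.contains a := by
  rw [PySem.Dict.contains_eq_decide_mem_keys, pvInv_keys d order counts h]
  simp

-- adding a key with an empty prerequisite list ~ appending a fresh page to the order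
theorem pvInv_addkey (d : PySem.Dict Int (List Int)) (order : List Int) (counts : PySem.Dict Int Int)
    (a : Int) (h : pvInv d order counts) :
    pvInv (if d.contains a then d else d.insert a [])
      (if order.contains a then order else order ++ [a]) counts := by
  have hco := pvInv_contains d order counts h a
  by_cases hc : d.contains a = true
  · rw [if_pos hc, if_pos (hco ▸ hc)]; exact h
  · have hdf : d.contains a = false := by simpa using hc
    have hof : order.contains a = false := hco ▸ hdf
    have hnc : counts.contains a = false := by
      cases hx : counts.contains a with
      | false => rfl
      | true =>
        have := h.2.2 a hx
        rw [hof] at this; exact absurd this (by simp)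
    rw [if_neg (by rw [hdf]; simp), if_neg (by rw [hof]; simp)]
    refine ⟨PySem.Dict.nodup_keys_insert d a [] h.1, ?_, ?_⟩
    · rw [PySem.Dict.items_insert_of_not_contains d [] hdf]
      simp [h.2.1, PySem.Dict.getD_of_not_contains counts (0 : Int) hnc]
    · intro k hk
      have hm : k ∈ order := by simpa using h.2.2 k hk
      simp [hm]

-- appending one prerequisite to page b's list ~ bumping b's count
theorem pvInv_bump (d : PySem.Dict Int (List Int)) (order : List Int) (counts : PySem.Dict Int Int)
    (b a : Int) (h : pvInv d order counts) (hb : d.contains b = true) :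
    pvInv (d.modify b [] (fun l => l ++ [a])) order (counts.insert b (counts.getD b 0 + 1)) := by
  have hmod : d.modify b [] (fun l => l ++ [a]) = d.insert b (d.getD b [] ++ [a]) := rfl
  rw [hmod]
  refine ⟨?_, ?_, ?_⟩
  · rw [PySem.Dict.keys_insert_of_contains d _ hb]
    exact h.1
  · rw [PySem.Dict.items_insert_of_contains d _ hb]
    have lhs : (d.items.map (fun p => if p.1 == b then (b, d.getD b [] ++ [a]) else p)).map
        (fun kv => (kv.1, (kv.2.length : Int)))
        = (d.items.map (fun kv => (kv.1, (kv.2.length : Int)))).map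
            (fun q => if q.1 == b then (q.1, q.2 + 1) else q) := by
      simp only [List.map_map]
      refine List.map_congr_left (fun p hp => ?_)
      by_cases hpb : p.1 = b
      · have hmem : (b, p.2) ∈ d.items := by rw [← hpb]; exact hp
        have hval := PySem.Dict.getD_of_mem_items d hmem h.1 ([] : List Int)
        simp [Function.comp, hpb, hval]
      · simp [Function.comp, hpb]
    rw [lhs, h.2.1, List.map_map]
    refine List.map_congr_left (fun k _ => ?_)
    by_cases hkb : k = b
    · simp [Function.comp, hkb, PySem.Dict.getD_insert_self]
    · simp [Function.comp, hkb, PySem.Dict.getD_insert_of_ne counts _ _ hkb]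
  · intro k hk
    rw [PySem.Dict.contains_insert] at hk
    rcases (by simpa using hk : k = b ∨ counts.contains k = true) with hkb | hkc
    · subst hkb
      have hcc := pvInv_contains d order counts h k
      rw [hcc] at hb; exact hb
    · exact h.2.2 k hkc

-- the whole build loops of A and B preserve the invariant
theorem pvInv_fold (page : List Int) :
    ∀ (rules : List (Int × Int)) (d : PySem.Dict Int (List Int)) (st : List Int × PySem.Dict Int Int),
    pvInv d st.1 st.2 →
    pvInv (rules.foldl (fun prereqs r =>
        if ¬ page.contains r.1 ∨ ¬ page.contains r.2 then prereqs
        else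
          let prereqs := if prereqs.contains r.1 then prereqs else prereqs.insert r.1 []
          let prereqs := if prereqs.contains r.2 then prereqs else prereqs.insert r.2 []
          prereqs.modify r.2 [] (fun l => l ++ [r.1])) d)
      ((rules.foldl (fun (st : List Int × PySem.Dict Int Int) ab =>
        if page.contains ab.1 && page.contains ab.2 then
          let order := if st.1.contains ab.1 then st.1 else st.1 ++ [ab.1]
          let order := if order.contains ab.2 then order else order ++ [ab.2]
          (order, st.2.insert ab.2 (st.2.getD ab.2 0 + 1))
        else st) st).1)
      ((rules.foldl (fun (st : List Int × PySem.Dict Int Int) ab =>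
        if page.contains ab.1 && page.contains ab.2 then
          let order := if st.1.contains ab.1 then st.1 else st.1 ++ [ab.1]
          let order := if order.contains ab.2 then order else order ++ [ab.2]
          (order, st.2.insert ab.2 (st.2.getD ab.2 0 + 1))
        else st) st).2) := by
  intro rules
  induction rules with
  | nil => intro d st h; simpa using h
  | cons r t ih =>
    intro d st h
    by_cases h1 : page.contains r.1 = true
    · by_cases h2 : page.contains r.2 = true
      · simp only [List.foldl_cons, h1, h2, Bool.and_self, not_true, or_self,
          if_false, if_true]
        have step1 := pvInv_addkey d st.1 st.2 r.1 h
        have step2 := pvInv_addkey _ _ _ r.2 step1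
        have hbin : (if (if d.contains r.1 then d else d.insert r.1 []).contains r.2 then
              (if d.contains r.1 then d else d.insert r.1 [])
            else (if d.contains r.1 then d else d.insert r.1 []).insert r.2 []).contains r.2 = true := by
          by_cases hc : (if d.contains r.1 then d else d.insert r.1 []).contains r.2 = true
          · rw [if_pos hc]; exact hc
          · rw [if_neg hc]; exact PySem.Dict.contains_insert_self _ _ _
        have step3 := pvInv_bump _ _ _ r.2 r.1 step2 hbin
        exact ih _ ⟨_, _⟩ step3
      · have h2f : page.contains r.2 = false := by simpa using h2
        simp only [List.foldl_cons, h1, h2f, Bool.and_false, Bool.false_eq_true, not_true,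
          not_false_iff, or_true, if_true, if_false]
        exact ih d st h
    · have h1f : page.contains r.1 = false := by simpa using h1
      simp only [List.foldl_cons, h1f, Bool.false_and, Bool.false_eq_true, not_false_iff,
        true_or, if_true, if_false]
      exact ih d st h

-- 'if c not in by_count: by_count[c] = k' loop realises first-match lookup
theorem get?_foldl_insert_new {α κ ν : Type} [BEq κ] [LawfulBEq κ] (key : α → κ) (val : α → ν) :
    ∀ (l : List α) (d : PySem.Dict κ ν) (i : κ),
      (l.foldl (fun d x => if d.contains (key x) then d else d.insert (key x) (val x)) d).get? i
        = (d.get? i).or ((l.find? (fun x => key x == i)).map val) := by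
  intro l
  induction l with
  | nil => intro d i; simp
  | cons x t ih =>
    intro d i
    simp only [List.foldl_cons, List.find?_cons]
    by_cases hc : d.contains (key x) = true
    · rw [if_pos hc, ih]
      by_cases hk : key x = i
      · subst hk
        have : (d.get? (key x)).isSome := by
          rw [← PySem.Dict.contains_eq_isSome_get?]; exact hc
        cases hd : d.get? (key x) with
        | none => rw [hd] at this; simp at this
        | some v => simp
      · have hb : (key x == i) = false := by simp [hk]
        rw [hb]
    · rw [if_neg hc, ih]
      by_cases hk : key x = i
      · subst hk
        have hdn : d.get? (key x) = none := by
          rw [PySem.Dict.get?_eq_none_iff_contains]; simpa using hc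
        simp [PySem.Dict.get?_insert_self, hdn]
      · have hb : (key x == i) = false := by simp [hk]
        rw [hb, PySem.Dict.get?_insert_of_ne d _ (Ne.symm hk)]

-- A's while/for-break loop as a filterMap over the first-match scan
theorem foldl_find_filterMap (items : List (Int × List Int)) :
    ∀ (l : List Int) (acc : List Int),
      l.foldl (fun c i => match items.find? (fun kv => (kv.2.length : Int) == i) with
        | some kv => c ++ [kv.1] | none => c) acc
      = acc ++ l.filterMap (fun i => (items.find? (fun kv => (kv.2.length : Int) == i)).map (·.1)) := by
  intro l
  induction l with
  | nil => intro acc; simp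
  | cons x t ih =>
    intro acc
    simp only [List.foldl_cons, List.filterMap_cons]
    cases h : items.find? (fun kv => (kv.2.length : Int) == x) with
    | none => simp [ih]
    | some kv => simp [ih]

-- ===== VERDICT (by name: the statement is the Claim_ definition above) =====
theorem correct_book_spec : Claim_equal_correct_book := by
  intro rules page _
  unfold Spec_correct_book correct_book correct_book_alt build_prereq_list
  have hinv := pvInv_fold page rules PySem.Dict.empty ([], PySem.Dict.empty)
    ⟨by simp [PySem.Dict.keys, show (PySem.Dict.empty : PySem.Dict Int (List Int)).items = [] from rfl],
     by simp [show (PySem.Dict.empty : PySem.Dict Int (List Int)).items = [] from rfl],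
     by simp⟩
  simp only []
  rw [foldl_find_filterMap]
  rw [List.nil_append]
  refine List.filterMap_congr (fun i _ => ?_)
  rw [get?_foldl_insert_new (fun k => _) (fun k => k)]
  simp only [PySem.Dict.get?_empty, Option.none_or]
  -- bridge through the invariant's items/order equation
  have hmap := hinv.2.1
  have e1 := congrArg (fun l => (l.find? (fun q : Int × Int => q.2 == i)).map Prod.fst) hmap
  simp only [List.find?_map, Option.map_map] at e1
  exact e1
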